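-- pv_equiv track=rewrite | github.com/jefftenb-db/data_mapping | sql_mapper.py | _mask_string_literals
-- ===== SOURCE A (Python) =====
-- def _mask_string_literals(sql: str) -> tuple[str, list[str]]:
--     """
--     Replace single-quoted string literals with placeholders. Returns (modified_sql, list of original strings).
--     Handles escaped '' inside strings.
--     """
--     literals: list[str] = []
--     result = []
--     i = 0
--     while i < len(sql):
--         if sql[i] == "'" and (i == 0 or sql[i - 1] != "'"):
--             # Start of string literal
--             start = i
--             i += 1
--             while i < len(sql):
--                 if sql[i] == "'":
--                     if i + 1 < len(sql) and sql[i + 1] == "'":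
--                         i += 2  # escaped quote
--                         continue
--                     break
--                 i += 1
--             i += 1  # closing quote
--             literals.append(sql[start:i])
--             result.append(f"\x00\x00{len(literals)-1}\x00\x00")
--             continue
--         result.append(sql[i])
--         i += 1
--     return "".join(result), literals
-- ===== SOURCE B (Python) =====
-- def _mask_string_literals(sql: str) -> tuple[str, list[str]]:
--     """
--     Replace single-quoted string literals with placeholders. Returns (modified_sql, list of original strings).
--     Handles escaped '' inside strings.
--     """
--     literals: list[str] = []
--     out: list[str] = []
--     rest = sql
--     while rest:
--         j = rest.find("'")
--         if j < 0:
--             out.append(rest)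
--             break
--         out.append(rest[:j])
--         lit = ["'"]
--         rest = rest[j + 1:]
--         while True:
--             e = rest.find("'")
--             if e < 0:
--                 lit.append(rest)
--                 rest = ""
--                 break
--             if rest[e + 1:e + 2] == "'":
--                 lit.append(rest[:e + 2])
--                 rest = rest[e + 2:]
--             else:
--                 lit.append(rest[:e + 1])
--                 rest = rest[e + 1:]
--                 break
--         literals.append("".join(lit))
--         out.append(f"\x00\x00{len(literals) - 1}\x00\x00")
--     return "".join(out), literals
-- ===== Notes on version B (the rewrite author's own statement) =====
-- stated objective: faster
-- what changed: A's index-driven character-at-a-time state machine is replaced by repeated str.find jumps that carve the input into whole chunks (prefix, literal pieces around escaped '' pairs, remainder) via slicing.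
import Mathlib
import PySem

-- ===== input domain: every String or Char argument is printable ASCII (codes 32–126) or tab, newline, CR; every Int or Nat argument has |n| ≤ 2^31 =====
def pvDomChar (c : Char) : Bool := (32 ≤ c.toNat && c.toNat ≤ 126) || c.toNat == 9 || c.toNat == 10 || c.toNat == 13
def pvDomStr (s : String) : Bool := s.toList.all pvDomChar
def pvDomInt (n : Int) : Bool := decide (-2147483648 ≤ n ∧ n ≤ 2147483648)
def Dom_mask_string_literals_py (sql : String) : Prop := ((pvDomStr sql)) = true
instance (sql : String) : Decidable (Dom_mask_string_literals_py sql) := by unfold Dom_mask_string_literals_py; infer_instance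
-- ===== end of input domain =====

-- B replaces A's index-driven character-at-a-time state machine by repeated find-and-slice
-- chunking of the remaining suffix (objective: alternative; same return value).

-- shared helper: the placeholder text "\x00\x00<n>\x00\x00"
def pvPlaceholder (n : Int) : List Char :=
  '\x00' :: '\x00' :: (PySem.Int.toChars n ++ ['\x00', '\x00'])

-- ===== PORT A =====
-- inner `while i < len(sql): …` loop of A: returns the index i at which the loop stops
-- termination helpers kept as named root-level lemmas so the ports' bodies stay small
theorem pvDecSub2 (n i : Nat) (h : i < n) : n - (i + 2) < n - i := by omega
theorem pvDecSub1 (n i : Nat) (h : i < n) : n - (i + 1) < n - i := by omega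

def pvAInner (cs : List Char) (i : Nat) : Nat :=
  if h : i < cs.length then
    if cs[i] = '\'' then
      if i + 1 < cs.length ∧ cs[i + 1]? = some '\'' then
        pvAInner cs (i + 2)           -- escaped quote
      else i                          -- break
    else pvAInner cs (i + 1)
  else i
termination_by cs.length - i
decreasing_by
  · exact pvDecSub2 cs.length i h
  · exact pvDecSub1 cs.length i h

-- needed by pvALoop's termination proof
theorem pvAInner_ge (cs : List Char) (i : Nat) : i ≤ pvAInner cs i := by
  fun_induction pvAInner cs i <;> omega

theorem pvALoopDec (cs : List Char) (i : Nat) (h : i < cs.length) :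
    cs.length - (pvAInner cs (i + 1) + 1) < cs.length - i := by
  have := pvAInner_ge cs (i + 1); omega

-- outer `while i < len(sql)` loop of A, with the two accumulator lists
def pvALoop (cs : List Char) (i : Nat) (lits res : List (List Char)) :
    List Char × List (List Char) :=
  if h : i < cs.length then
    if cs[i] = '\'' ∧ (i = 0 ∨ cs[i - 1]? ≠ some '\'') then
      -- start of string literal
      let start := i
      let j := pvAInner cs (i + 1) + 1          -- inner loop, then `i += 1` (closing quote)
      let lits' := lits ++ [PySem.List.slice cs (some (start : Int)) (some (j : Int))]
      pvALoop cs j lits' (res ++ [pvPlaceholder ((lits'.length : Int) - 1)])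
    else
      pvALoop cs (i + 1) lits (res ++ [[cs[i]]])
  else (PySem.Chars.join [] res, lits)
termination_by cs.length - i
decreasing_by
  · exact pvALoopDec cs i h
  · exact pvDecSub1 cs.length i h

def mask_string_literals_py (sql : String) : String × List String :=
  let r := pvALoop sql.toList 0 [] []
  (String.ofList r.1, r.2.map String.ofList)

-- ===== PORT B =====
theorem pvBInnerDec (rest : List Char) (h : ¬ PySem.Chars.find rest ['\''] < 0) :
    (PySem.List.slice rest (some (PySem.Chars.find rest ['\''] + 2)) none).length < rest.length := by
  have h0 : 0 ≤ PySem.Chars.find rest ['\''] := by omega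
  have hin : ['\''] <:+: rest := (PySem.Chars.find_nonneg_iff rest ['\'']).mp h0
  have hne : rest ≠ [] := by rintro rfl; simpa using hin.length_le
  rw [PySem.List.slice_from _ (show (0:Int) ≤ PySem.Chars.find rest ['\''] + 2 by omega)]
  have hlen : 0 < rest.length := List.length_pos_iff.mpr hne
  have : 0 < (PySem.Chars.find rest ['\''] + 2).toNat := by omega
  simp only [List.length_drop]; omega

-- inner `while True:` loop of B: accumulates literal chunks, returns (lit, rest)
def pvBInner (rest : List Char) (lit : List (List Char)) :
    List (List Char) × List Char :=
  let e := PySem.Chars.find rest ['\'']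
  if e < 0 then
    (lit ++ [rest], [])
  else if PySem.List.slice rest (some (e + 1)) (some (e + 2)) = ['\''] then
    pvBInner (PySem.List.slice rest (some (e + 2)) none)
      (lit ++ [PySem.List.slice rest none (some (e + 2))])
  else
    (lit ++ [PySem.List.slice rest none (some (e + 1))],
     PySem.List.slice rest (some (e + 1)) none)
termination_by rest.length
decreasing_by rename_i h hesc; exact pvBInnerDec rest h

-- needed by pvBLoop's termination proof
theorem pvBInner_rest_le (rest : List Char) (lit : List (List Char)) :
    (pvBInner rest lit).2.length ≤ rest.length := by
  fun_induction pvBInner rest lit with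
  | case1 => simp
  | case2 rest lit e h hesc ih =>
      refine le_trans ih ?_
      rw [PySem.List.slice_from _ (by omega)]
      simp
  | case3 rest lit e h hesc =>
      rw [PySem.List.slice_from _ (by omega)]
      simp

theorem pvBLoopDec (rest : List Char) (hne : ¬ rest = []) (h : ¬ PySem.Chars.find rest ['\''] < 0) :
    (pvBInner (PySem.List.slice rest (some (PySem.Chars.find rest ['\''] + 1)) none) [['\'']]).2.length < rest.length := by
  have h1 : 0 ≤ PySem.Chars.find rest ['\''] + 1 := by omega
  have hle := pvBInner_rest_le (PySem.List.slice rest (some (PySem.Chars.find rest ['\''] + 1)) none) [['\'']]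
  refine lt_of_le_of_lt hle ?_
  rw [PySem.List.slice_from _ h1]
  have hlen : 0 < rest.length := List.length_pos_iff.mpr hne
  have : 0 < (PySem.Chars.find rest ['\''] + 1).toNat := by omega
  simp only [List.length_drop]
  omega

-- outer `while rest:` loop of B
def pvBLoop (rest : List Char) (lits out : List (List Char)) :
    List Char × List (List Char) :=
  if hne : rest = [] then (PySem.Chars.join [] out, lits)
  else
    let j := PySem.Chars.find rest ['\'']
    if j < 0 then (PySem.Chars.join [] (out ++ [rest]), lits)
    else
      let out1 := out ++ [PySem.List.slice rest none (some j)]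
      let p := pvBInner (PySem.List.slice rest (some (j + 1)) none) [['\'']]
      let lits' := lits ++ [PySem.Chars.join [] p.1]
      pvBLoop p.2 lits' (out1 ++ [pvPlaceholder ((lits'.length : Int) - 1)])
termination_by rest.length
decreasing_by rename_i h; exact pvBLoopDec rest hne h

def mask_string_literals_py_alt (sql : String) : String × List String :=
  let r := pvBLoop sql.toList [] []
  (String.ofList r.1, r.2.map String.ofList)

-- ===== PRECONDITION & SPEC =====
def Spec_mask_string_literals_py (sql : String) (out : String × List String) : Prop := out = mask_string_literals_py_alt sql
instance (sql : String) (out : String × List String) : Decidable (Spec_mask_string_literals_py sql out) := by unfold Spec_mask_string_literals_py; infer_instance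

-- ===== CLAIM (what is proved, stated in full; the proofs are below) =====
def Claim_equal_mask_string_literals_py : Prop := ∀ (sql : String), Dom_mask_string_literals_py sql → Spec_mask_string_literals_py sql (mask_string_literals_py sql)

-- ===== LEMMAS AND PROOFS =====

-- middle-layer reference: consume one literal after its opening quote
-- (returns the consumed characters including the closing quote, and the remainder)
def pvScanLit : List Char → List Char × List Char
  | [] => ([], [])
  | '\'' :: '\'' :: r2 => ('\'' :: '\'' :: (pvScanLit r2).1, (pvScanLit r2).2)
  | '\'' :: rest => (['\''], rest)
  | c :: rest => (c :: (pvScanLit rest).1, (pvScanLit rest).2)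

theorem pvScanLit_len (r : List Char) : (pvScanLit r).2.length ≤ r.length := by
  fun_induction pvScanLit r <;> simp_all <;> omega

theorem pvScanLit_cons_ne (c : Char) (h : c ≠ '\'') (rest : List Char) :
    pvScanLit (c :: rest) = (c :: (pvScanLit rest).1, (pvScanLit rest).2) := by
  cases rest <;> simp [pvScanLit, h]

theorem pvScanLit_qq (r2 : List Char) :
    pvScanLit ('\'' :: '\'' :: r2) = ('\'' :: '\'' :: (pvScanLit r2).1, (pvScanLit r2).2) := by
  simp [pvScanLit]

theorem pvScanLit_q (rest : List Char) (h : rest.head? ≠ some '\'') :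
    pvScanLit ('\'' :: rest) = (['\''], rest) := by
  cases rest with
  | nil => simp [pvScanLit]
  | cons c t => simp at h; simp [pvScanLit, h]

theorem pvScanLit_no_quote (pre : List Char) (hp : '\'' ∉ pre) :
    ∀ r, pvScanLit (pre ++ r) = (pre ++ (pvScanLit r).1, (pvScanLit r).2) := by
  induction pre with
  | nil => simp
  | cons c t ih =>
      intro r
      simp at hp
      rw [List.cons_append, pvScanLit_cons_ne c (Ne.symm hp.1) (t ++ r), ih hp.2 r]
      simp

-- middle-layer reference machine: both loops compute this
def pvM : List Char → Nat → List Char × List (List Char)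
  | [], _ => ([], [])
  | '\'' :: rest, n =>
      (pvPlaceholder (n : Int) ++ (pvM (pvScanLit rest).2 (n + 1)).1,
       ('\'' :: (pvScanLit rest).1) :: (pvM (pvScanLit rest).2 (n + 1)).2)
  | c :: rest, n => (c :: (pvM rest n).1, (pvM rest n).2)
termination_by cs _ => cs.length
decreasing_by
  · have := pvScanLit_len rest; simp; omega
  · simp

theorem pvM_quote (rest : List Char) (n : Nat) :
    pvM ('\'' :: rest) n =
      (pvPlaceholder (n : Int) ++ (pvM (pvScanLit rest).2 (n + 1)).1,
       ('\'' :: (pvScanLit rest).1) :: (pvM (pvScanLit rest).2 (n + 1)).2) := by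
  simp [pvM]

theorem pvM_cons_ne (c : Char) (h : c ≠ '\'') (rest : List Char) (n : Nat) :
    pvM (c :: rest) n = (c :: (pvM rest n).1, (pvM rest n).2) := by
  rw [pvM]
  simp [h]

theorem pvM_no_quote (pre : List Char) (hp : '\'' ∉ pre) (n : Nat) :
    ∀ r, pvM (pre ++ r) n = (pre ++ (pvM r n).1, (pvM r n).2) := by
  induction pre with
  | nil => simp
  | cons c t ih =>
      intro r
      simp at hp
      rw [List.cons_append, pvM_cons_ne c (Ne.symm hp.1) (t ++ r) n, ih hp.2 r]
      simp

theorem pvJoinNil : ∀ l : List (List Char), PySem.Chars.join [] l = l.flatten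
  | [] => PySem.Chars.join_nil []
  | [a] => by simp [PySem.Chars.join_singleton]
  | a :: b :: t => by rw [PySem.Chars.join_cons_cons]; simp [pvJoinNil (b :: t)]

-- A's inner loop scans exactly one literal (pvScanLit), as take/drop around its stop index
theorem pvAInner_eq (cs : List Char) (k : Nat) :
    pvScanLit (cs.drop k) =
      ((cs.drop k).take (pvAInner cs k + 1 - k), cs.drop (pvAInner cs k + 1)) := by
  fun_induction pvAInner cs k with
  | case1 k h hq hesc ih =>
      have h1 : k + 1 < cs.length := hesc.1
      have hq1 : cs[k + 1]? = some '\'' := hesc.2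
      have hd : cs.drop k = '\'' :: cs.drop (k + 1) := by
        rw [List.drop_eq_getElem_cons h, hq]
      have hd1 : cs.drop (k + 1) = '\'' :: cs.drop (k + 2) := by
        rw [List.drop_eq_getElem_cons h1]
        have : cs[k + 1] = '\'' := by
          have := List.getElem?_eq_getElem h1
          rw [this] at hq1; exact Option.some_injective _ hq1
        rw [this]
      have hge := pvAInner_ge cs (k + 2)
      rw [hd, hd1, pvScanLit_qq, ih]
      have e1 : pvAInner cs (k + 2) + 1 - k = ((pvAInner cs (k + 2) + 1 - (k + 2)) + 1) + 1 := by omega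
      rw [e1, List.take_succ_cons, List.take_succ_cons]
  | case2 k h hq hesc =>
      have hd : cs.drop k = '\'' :: cs.drop (k + 1) := by
        rw [List.drop_eq_getElem_cons h, hq]
      have hh : (cs.drop (k + 1)).head? ≠ some '\'' := by
        by_cases h1 : k + 1 < cs.length
        · have : cs[k + 1]? ≠ some '\'' := fun hc => hesc ⟨h1, hc⟩
          rw [List.head?_drop]
          exact this
        · rw [List.drop_eq_nil_of_le (by omega)]
          simp
      rw [hd, pvScanLit_q _ hh]
      simp
  | case3 k h hq ih =>
      have hd : cs.drop k = cs[k] :: cs.drop (k + 1) := List.drop_eq_getElem_cons h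
      have hge := pvAInner_ge cs (k + 1)
      rw [hd, pvScanLit_cons_ne _ hq, ih]
      have e1 : pvAInner cs (k + 1) + 1 - k = (pvAInner cs (k + 1) + 1 - (k + 1)) + 1 := by omega
      rw [e1, List.take_succ_cons]
  | case4 k h =>
      have : cs.drop k = [] := List.drop_eq_nil_of_le (by omega)
      rw [this, List.drop_eq_nil_of_le (by omega)]
      simp [pvScanLit]

-- the character after A's inner-loop stop index is never a quote
theorem pvAInner_next (cs : List Char) (k : Nat) :
    cs[pvAInner cs k + 1]? ≠ some '\'' := by
  fun_induction pvAInner cs k with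
  | case1 k h hq hesc ih => exact ih
  | case2 k h hq hesc =>
      by_cases h1 : k + 1 < cs.length
      · exact fun hc => hesc ⟨h1, hc⟩
      · rw [List.getElem?_eq_none (by omega)]; simp
  | case3 k h hq ih => exact ih
  | case4 k h =>
      rw [List.getElem?_eq_none (by omega)]; simp

-- A's outer loop computes pvM (the `i = 0 ∨ …` invariant: at every reachable position a
-- quote is never preceded by a quote, so A's extra prev-char test always passes)
theorem pvALoop_eq (cs : List Char) (i : Nat) (lits res : List (List Char)) :
    (i = 0 ∨ cs[i - 1]? ≠ some '\'' ∨ cs[i]? ≠ some '\'') →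
    pvALoop cs i lits res =
      (PySem.Chars.join [] res ++ (pvM (cs.drop i) lits.length).1,
       lits ++ (pvM (cs.drop i) lits.length).2) := by
  fun_induction pvALoop cs i lits res with
  | case1 i lits res h hcond start j lits' ih =>
      intro _
      have hq : cs[i] = '\'' := hcond.1
      have hge : i + 1 ≤ pvAInner cs (i + 1) := pvAInner_ge cs (i + 1)
      have hscan := pvAInner_eq cs (i + 1)
      have hd : cs.drop i = '\'' :: cs.drop (i + 1) := by
        rw [List.drop_eq_getElem_cons h, hq]
      -- the literal slice is the opening quote plus what pvScanLit consumes
      have hlit : PySem.List.slice cs (some (start : Int)) (some (j : Int))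
          = '\'' :: (pvScanLit (cs.drop (i + 1))).1 := by
        show PySem.List.slice cs (some ((i : Nat) : Int)) (some ((pvAInner cs (i + 1) + 1 : Nat) : Int)) = _
        rw [PySem.List.slice_natCast, hscan, hd]
        have e1 : pvAInner cs (i + 1) + 1 - i = (pvAInner cs (i + 1) + 1 - (i + 1)) + 1 := by omega
        rw [e1, List.take_succ_cons]
      have hQ : j = 0 ∨ cs[j - 1]? ≠ some '\'' ∨ cs[j]? ≠ some '\'' :=
        Or.inr (Or.inr (pvAInner_next cs (i + 1)))
      rw [ih hQ]
      have hrest : (pvScanLit (cs.drop (i + 1))).2 = cs.drop j := by rw [hscan]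
      have hlen : lits'.length = lits.length + 1 := by simp [lits']
      have hph : ((lits'.length : Int) - 1) = (lits.length : Int) := by rw [hlen]; push_cast; ring
      rw [hd, pvM_quote, hrest]
      simp only [Prod.mk.injEq]
      refine ⟨?_, ?_⟩
      · simp [pvJoinNil, hlen]
      · simp [lits', hlit, List.append_assoc]
  | case2 i lits res h hcond ih =>
      intro hQ
      have hq : cs[i] ≠ '\'' := by
        intro hc
        apply hcond
        refine ⟨hc, ?_⟩
        rcases hQ with h0 | hprev | hcur
        · exact Or.inl h0
        · exact Or.inr hprev
        · exact absurd (by rw [List.getElem?_eq_getElem h, hc]) hcur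
      have hd : cs.drop i = cs[i] :: cs.drop (i + 1) := List.drop_eq_getElem_cons h
      have hQ' : i + 1 = 0 ∨ cs[i + 1 - 1]? ≠ some '\'' ∨ cs[i + 1]? ≠ some '\'' := by
        refine Or.inr (Or.inl ?_)
        simp only [Nat.add_sub_cancel]
        rw [List.getElem?_eq_getElem h]
        exact fun hc => hq (Option.some_injective _ hc)
      rw [ih hQ', hd, pvM_cons_ne _ hq]
      simp [pvJoinNil]
  | case3 i lits res h =>
      intro _
      have : cs.drop i = [] := List.drop_eq_nil_of_le (by omega)
      rw [this]
      simp [pvM]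

theorem pvSingletonPrefix (c : Char) (l : List Char) : [c] <+: l ↔ l.head? = some c := by
  cases l <;> simp [List.prefix_cons_iff, eq_comm]

-- what a non-negative find of "'" means: a quote at that index, none before it
theorem pvFindQ (rest : List Char) (h : 0 ≤ PySem.Chars.find rest ['\'']) :
    (PySem.Chars.find rest ['\'']).toNat < rest.length ∧
    rest[(PySem.Chars.find rest ['\'']).toNat]? = some '\'' ∧
    '\'' ∉ rest.take (PySem.Chars.find rest ['\'']).toNat := by
  obtain ⟨hpre, hmin⟩ := PySem.Chars.find_spec h
  rw [pvSingletonPrefix, List.head?_drop] at hpre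
  have hklt : (PySem.Chars.find rest ['\'']).toNat < rest.length :=
    (List.getElem?_eq_some_iff.mp hpre).1
  refine ⟨hklt, hpre, ?_⟩
  intro hmem
  obtain ⟨i, hi, hgi⟩ := List.getElem_of_mem hmem
  have hlt : i < (PySem.Chars.find rest ['\'']).toNat := by
    simp [List.length_take] at hi; omega
  apply hmin i hlt
  rw [pvSingletonPrefix, List.head?_drop, List.getElem?_eq_getElem (by omega)]
  rw [List.getElem_take] at hgi
  exact congrArg some hgi

theorem pvFindNone (rest : List Char) (h : PySem.Chars.find rest ['\''] < 0) :
    '\'' ∉ rest := by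
  have h1 : PySem.Chars.find rest ['\''] = -1 := by
    have := PySem.Chars.neg_one_le_find rest ['\'']
    omega
  have := (PySem.Chars.find_eq_neg_one_iff rest ['\'']).mp h1
  rw [List.singleton_infix_iff] at this
  exact this

theorem pvScanLit_all (rest : List Char) (h : '\'' ∉ rest) :
    pvScanLit rest = (rest, []) := by
  have := pvScanLit_no_quote rest h []
  simpa [pvScanLit] using this

-- B's inner loop accumulates exactly pvScanLit's literal and leaves pvScanLit's remainder
theorem pvBInner_eq (rest : List Char) (lit : List (List Char)) :
    PySem.Chars.join [] (pvBInner rest lit).1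
        = PySem.Chars.join [] lit ++ (pvScanLit rest).1
      ∧ (pvBInner rest lit).2 = (pvScanLit rest).2 := by
  fun_induction pvBInner rest lit with
  | case1 rest lit e h =>
      have hnm : '\'' ∉ rest := pvFindNone rest h
      rw [pvScanLit_all rest hnm]
      simp [pvJoinNil]
  | case2 rest lit e h hesc ih =>
      have h0 : 0 ≤ e := by omega
      obtain ⟨hklt, hkq, hknm⟩ := pvFindQ rest h0
      have ht1 : (e + 1).toNat = e.toNat + 1 := by omega
      have ht2 : (e + 2).toNat = e.toNat + 2 := by omega
      -- the escape test says the char after the quote is another quote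
      have hk1 : rest[e.toNat + 1]? = some '\'' := by
        rw [PySem.List.slice_toNat _ (by omega) (by omega), ht1, ht2,
          (show e.toNat + 2 - (e.toNat + 1) = 1 by omega)] at hesc
        rw [← List.head?_drop]
        cases hd : (rest.drop (e.toNat + 1)) with
        | nil => rw [hd] at hesc; simp at hesc
        | cons a t => rw [hd] at hesc; simp at hesc; simp [hesc]
      have hk1lt : e.toNat + 1 < rest.length := (List.getElem?_eq_some_iff.mp hk1).1
      have hdec : rest = rest.take e.toNat ++ '\'' :: '\'' :: rest.drop (e.toNat + 2) := by
        conv_lhs => rw [← List.take_append_drop e.toNat rest]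
        congr 1
        rw [List.drop_eq_getElem_cons hklt,
          (Option.some_injective _ (by rw [← List.getElem?_eq_getElem hklt]; exact hkq) : rest[e.toNat] = '\'')]
        congr 1
        rw [List.drop_eq_getElem_cons hk1lt,
          (Option.some_injective _ (by rw [← List.getElem?_eq_getElem hk1lt]; exact hk1) : rest[e.toNat + 1] = '\'')]
      have hscan : pvScanLit rest
          = (rest.take e.toNat ++ '\'' :: '\'' :: (pvScanLit (rest.drop (e.toNat + 2))).1,
             (pvScanLit (rest.drop (e.toNat + 2))).2) := by
        conv_lhs => rw [hdec]
        rw [pvScanLit_no_quote _ hknm, pvScanLit_qq]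
      have hs1 : PySem.List.slice rest (some (e + 2)) none = rest.drop (e.toNat + 2) := by
        rw [PySem.List.slice_from _ (by omega), ht2]
      have hs2 : PySem.List.slice rest none (some (e + 2)) = rest.take e.toNat ++ ['\'', '\''] := by
        rw [PySem.List.slice_to _ (by omega), ht2]
        conv_lhs => rw [hdec]
        rw [List.take_append]
        have hlen : (rest.take e.toNat).length = e.toNat := by
          rw [List.length_take]; omega
        rw [List.take_of_length_le (by omega), hlen]
        simp
      rw [hs1, hs2] at ih
      rw [hscan, hs1, hs2]
      refine ⟨?_, ih.2⟩
      rw [ih.1]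
      simp [pvJoinNil]
  | case3 rest lit e h hesc =>
      have h0 : 0 ≤ e := by omega
      obtain ⟨hklt, hkq, hknm⟩ := pvFindQ rest h0
      have ht1 : (e + 1).toNat = e.toNat + 1 := by omega
      have ht2 : (e + 2).toNat = e.toNat + 2 := by omega
      have hk1 : (rest.drop (e.toNat + 1)).head? ≠ some '\'' := by
        intro hc
        apply hesc
        rw [PySem.List.slice_toNat _ (by omega) (by omega), ht1, ht2,
          (show e.toNat + 2 - (e.toNat + 1) = 1 by omega)]
        cases hd : (rest.drop (e.toNat + 1)) with
        | nil => rw [hd] at hc; simp at hc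
        | cons a t => rw [hd] at hc; simp at hc; simp [hd, hc]
      have hdec : rest = rest.take e.toNat ++ '\'' :: rest.drop (e.toNat + 1) := by
        conv_lhs => rw [← List.take_append_drop e.toNat rest]
        congr 1
        rw [List.drop_eq_getElem_cons hklt,
          (Option.some_injective _ (by rw [← List.getElem?_eq_getElem hklt]; exact hkq) : rest[e.toNat] = '\'')]
      have hscan : pvScanLit rest
          = (rest.take e.toNat ++ ['\''], rest.drop (e.toNat + 1)) := by
        conv_lhs => rw [hdec]
        rw [pvScanLit_no_quote _ hknm, pvScanLit_q _ hk1]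
      have hs1 : PySem.List.slice rest (some (e + 1)) none = rest.drop (e.toNat + 1) := by
        rw [PySem.List.slice_from _ (by omega), ht1]
      have hs2 : PySem.List.slice rest none (some (e + 1)) = rest.take e.toNat ++ ['\''] := by
        rw [PySem.List.slice_to _ (by omega), ht1]
        conv_lhs => rw [hdec]
        rw [List.take_append]
        have hlen : (rest.take e.toNat).length = e.toNat := by
          rw [List.length_take]; omega
        rw [List.take_of_length_le (by omega), hlen]
        simp
      rw [hscan, hs1, hs2]
      refine ⟨?_, rfl⟩
      simp [pvJoinNil]

-- B's outer loop computes pvM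
theorem pvBLoop_eq (rest : List Char) (lits out : List (List Char)) :
    pvBLoop rest lits out =
      (PySem.Chars.join [] out ++ (pvM rest lits.length).1,
       lits ++ (pvM rest lits.length).2) := by
  fun_induction pvBLoop rest lits out with
  | case1 lits out => simp [pvM]
  | case2 rest lits out hne j h =>
      have hnm : '\'' ∉ rest := pvFindNone rest h
      have := pvM_no_quote rest hnm lits.length []
      simp only [List.append_nil] at this
      rw [this]
      simp [pvJoinNil, pvM]
  | case3 rest lits out hne j h out1 p lits' ih =>
      have h0 : 0 ≤ j := by omega
      obtain ⟨hklt, hkq, hknm⟩ := pvFindQ rest h0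
      have ht1 : (j + 1).toNat = j.toNat + 1 := by omega
      have hdec : rest = rest.take j.toNat ++ '\'' :: rest.drop (j.toNat + 1) := by
        conv_lhs => rw [← List.take_append_drop j.toNat rest]
        congr 1
        rw [List.drop_eq_getElem_cons hklt,
          (Option.some_injective _ (by rw [← List.getElem?_eq_getElem hklt]; exact hkq) : rest[j.toNat] = '\'')]
      have hs1 : PySem.List.slice rest (some (j + 1)) none = rest.drop (j.toNat + 1) := by
        rw [PySem.List.slice_from _ (by omega), ht1]
      have hs2 : PySem.List.slice rest none (some j) = rest.take j.toNat := by
        rw [PySem.List.slice_to _ (by omega)]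
      -- the literal accumulated by the inner loop
      have hinner := pvBInner_eq (rest.drop (j.toNat + 1)) [['\'']]
      have hlit : PySem.Chars.join [] p.1 = '\'' :: (pvScanLit (rest.drop (j.toNat + 1))).1 := by
        show PySem.Chars.join [] (pvBInner (PySem.List.slice rest (some (j + 1)) none) [['\'']]).1 = _
        rw [hs1, hinner.1, PySem.Chars.join_singleton]
        simp
      have hrest : p.2 = (pvScanLit (rest.drop (j.toNat + 1))).2 := by
        show (pvBInner (PySem.List.slice rest (some (j + 1)) none) [['\'']]).2 = _
        rw [hs1, hinner.2]
      have hM : pvM rest lits.length =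
          (rest.take j.toNat ++
             (pvPlaceholder (lits.length : Int) ++ (pvM p.2 (lits.length + 1)).1),
           ('\'' :: (pvScanLit (rest.drop (j.toNat + 1))).1) :: (pvM p.2 (lits.length + 1)).2) := by
        conv_lhs => rw [hdec]
        rw [pvM_no_quote _ hknm, pvM_quote, ← hrest]
      have hlen : lits'.length = lits.length + 1 := by simp [lits']
      have hph : ((lits'.length : Int) - 1) = (lits.length : Int) := by rw [hlen]; push_cast; ring
      rw [ih, hM]
      simp only [Prod.mk.injEq]
      refine ⟨?_, ?_⟩
      · simp [pvJoinNil, hlen, out1, hs2]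
      · simp [lits', hlit, List.append_assoc]

-- ===== VERDICT (by name: the statement is the Claim_ definition above) =====
theorem mask_string_literals_py_spec : Claim_equal_mask_string_literals_py := by
  intro sql _
  unfold Spec_mask_string_literals_py mask_string_literals_py mask_string_literals_py_alt
  rw [pvALoop_eq sql.toList 0 [] [] (Or.inl rfl), pvBLoop_eq]
  simp
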